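-- pv_equiv track=rewrite | github.com/UWPCE-PythonCert-ClassRepos/SP_Online_PY210 | students/duanez2021/lesson02/gridPrinter_part3.py | print_grid2
-- ===== SOURCE A (Python) =====
-- def print_row2(column_size, cell_size):
--     #print a row of +/-
--     plus = '+'
--     minus = '-'
--     row = ''
--     # if n < 3 default to 3
--     if cell_size < 1: cell_size = 1
--     if column_size < 1: column_size=1
--
--     i = 1  # loop counter, number of +'s
--     #dash = n//2
--     for k in range(column_size+1):
--         row = row + plus
--         i = i + 1
--         if i <= column_size+1:
--             for y in range(cell_size):
--                 row = row + minus
--     return row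
--
-- def print_vRow2(col_size, cell_size):
--     vLine = '|'
--     vRow = ''
--     if cell_size < 1: cell_size = 1
--     if col_size < 1: col_size = 1
--
--     i = 1
--     for j in range(col_size + 1):
--         vRow = vRow + vLine
--         i = i + 1
--         if i <= col_size + 1:
--             for y in range(cell_size):
--                 vRow = vRow + ' '
--     return vRow
--
-- def print_grid2(grid_size, cell_size):
--     box = ''
--
--     if grid_size <= 1:  grid_size=2
--     if cell_size <= 1:  cell_size = 1
--
--     c = 1
--
--     for i in range(grid_size+1):
--         box = box + print_row2(grid_size, cell_size) + '\n'
--         c = c + 1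
--         if c <=grid_size + 1:
--             for j in range(cell_size):
--                 box = box + print_vRow2(grid_size, cell_size) + '\n'
--     return box
-- ===== SOURCE B (Python) =====
-- def print_grid2(grid_size, cell_size):
--     g = grid_size if grid_size > 1 else 2
--     c = cell_size if cell_size > 1 else 1
--     top = ('+' + '-' * c) * g + '+'
--     mid = ('|' + ' ' * c) * g + '|'
--     return (top + '\n' + (mid + '\n') * c) * g + top + '\n'
-- ===== Notes on version B (the rewrite author's own statement) =====
-- stated objective: simpler
-- what changed: Replaced the three counter-driven nested character-appending loops (the row and separator lines rebuilt character by character for every grid line) with closed-form string multiplication: build each line once by repetition and assemble the grid by repeating line blocks.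
import Mathlib
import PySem

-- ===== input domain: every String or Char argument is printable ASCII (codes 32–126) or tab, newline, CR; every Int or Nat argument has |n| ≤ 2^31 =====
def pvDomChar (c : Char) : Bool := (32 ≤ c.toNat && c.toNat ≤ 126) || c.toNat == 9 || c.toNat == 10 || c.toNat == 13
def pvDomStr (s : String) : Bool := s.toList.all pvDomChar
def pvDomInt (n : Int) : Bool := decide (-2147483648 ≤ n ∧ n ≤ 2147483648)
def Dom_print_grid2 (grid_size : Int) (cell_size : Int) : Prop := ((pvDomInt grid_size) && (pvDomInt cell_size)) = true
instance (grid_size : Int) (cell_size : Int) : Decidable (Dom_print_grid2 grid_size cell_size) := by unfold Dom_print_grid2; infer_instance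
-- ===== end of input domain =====

-- B replaces A's counter-driven nested character-appending loops with closed-form string repetition (objective: simpler).

-- ===== PORT A =====
-- Python strings are ported as List Char (String.ofList at the return); each 'for' is a foldl over the same pyRange with the same state.
def print_row2 (column_size : Int) (cell_size : Int) : List Char :=
  let cell_size := if cell_size < 1 then 1 else cell_size
  let column_size := if column_size < 1 then 1 else column_size
  let st := (PySem.List.pyRange 0 (column_size + 1) 1).foldl
    (fun (st : List Char × Int) (_ : Int) =>
      let row := st.1 ++ ['+']
      let i := st.2 + 1
      if i ≤ column_size + 1 then
        ((PySem.List.pyRange 0 cell_size 1).foldl (fun (r : List Char) (_ : Int) => r ++ ['-']) row, i)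
      else (row, i)) ([], 1)
  st.1

def print_vRow2 (col_size : Int) (cell_size : Int) : List Char :=
  let cell_size := if cell_size < 1 then 1 else cell_size
  let col_size := if col_size < 1 then 1 else col_size
  let st := (PySem.List.pyRange 0 (col_size + 1) 1).foldl
    (fun (st : List Char × Int) (_ : Int) =>
      let vRow := st.1 ++ ['|']
      let i := st.2 + 1
      if i ≤ col_size + 1 then
        ((PySem.List.pyRange 0 cell_size 1).foldl (fun (r : List Char) (_ : Int) => r ++ [' ']) vRow, i)
      else (vRow, i)) ([], 1)
  st.1

def print_grid2 (grid_size : Int) (cell_size : Int) : String :=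
  let grid_size := if grid_size ≤ 1 then 2 else grid_size
  let cell_size := if cell_size ≤ 1 then 1 else cell_size
  let st := (PySem.List.pyRange 0 (grid_size + 1) 1).foldl
    (fun (st : List Char × Int) (_ : Int) =>
      let box := st.1 ++ (print_row2 grid_size cell_size ++ ['\n'])
      let c := st.2 + 1
      if c ≤ grid_size + 1 then
        ((PySem.List.pyRange 0 cell_size 1).foldl
          (fun (b : List Char) (_ : Int) => b ++ (print_vRow2 grid_size cell_size ++ ['\n'])) box, c)
      else (box, c)) ([], 1)
  String.ofList st.1

-- ===== PORT B =====
def print_grid2_alt (grid_size : Int) (cell_size : Int) : String :=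
  let g := if grid_size > 1 then grid_size else 2
  let c := if cell_size > 1 then cell_size else 1
  let top := PySem.List.pyRepeat (['+'] ++ PySem.List.pyRepeat ['-'] c) g ++ ['+']
  let mid := PySem.List.pyRepeat (['|'] ++ PySem.List.pyRepeat [' '] c) g ++ ['|']
  String.ofList (PySem.List.pyRepeat (top ++ ['\n'] ++ PySem.List.pyRepeat (mid ++ ['\n']) c) g ++ top ++ ['\n'])

-- ===== PRECONDITION & SPEC =====
def Spec_print_grid2 (grid_size : Int) (cell_size : Int) (out : String) : Prop := out = print_grid2_alt grid_size cell_size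
instance (grid_size : Int) (cell_size : Int) (out : String) : Decidable (Spec_print_grid2 grid_size cell_size out) := by unfold Spec_print_grid2; infer_instance

-- ===== CLAIM (what is proved, stated in full; the proofs are below) =====
def Claim_equal_print_grid2 : Prop := ∀ (grid_size : Int) (cell_size : Int), Dom_print_grid2 grid_size cell_size → Spec_print_grid2 grid_size cell_size (print_grid2 grid_size cell_size)

-- ===== LEMMAS AND PROOFS =====

theorem pv_flat_singleton (n : Nat) (a : Char) :
    (List.replicate n [a]).flatten = List.replicate n a := by
  induction n with
  | zero => rfl
  | succ k ih => simp [List.replicate_succ, ih]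

-- appending a constant chunk once per loop iteration
theorem pv_fold_const (s : List Char) : ∀ (l : List Int) (r : List Char),
    l.foldl (fun (b : List Char) (_ : Int) => b ++ s) r
      = r ++ (List.replicate l.length s).flatten := by
  intro l
  induction l with
  | nil => intro r; simp
  | cons x xs ih => intro r; simp [List.foldl_cons, ih, List.replicate_succ]

-- the shared loop shape of A's three loops: append p, bump the counter,
-- then append the chunk seg while the counter stays ≤ L
theorem pv_loop (L : Int) (p seg : List Char) (f : (List Char × Int) → Int → (List Char × Int))
    (hf : ∀ st y, f st y =
      if st.2 + 1 ≤ L then (st.1 ++ p ++ seg, st.2 + 1) else (st.1 ++ p, st.2 + 1)) :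
    ∀ (l : List Int) (r : List Char) (i : Int), i + l.length ≤ L →
    l.foldl f (r, i) = (r ++ (List.replicate l.length (p ++ seg)).flatten, i + l.length) := by
  intro l
  induction l with
  | nil => intro r i h; simp
  | cons x xs ih =>
    intro r i h
    simp only [List.length_cons] at h
    have hi : i + 1 ≤ L := by
      have : (0 : Int) ≤ (xs.length : Int) := Int.natCast_nonneg _
      push_cast at h; omega
    rw [List.foldl_cons, hf, if_pos hi, ih (r ++ p ++ seg) (i + 1) (by push_cast at h; omega)]
    refine Prod.ext ?_ ?_
    · simp [List.replicate_succ]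
    · simp; omega

-- one full A-style loop: range(n+1) iterations, the guard fails only at the last step
theorem pv_whole_loop (n : Int) (hn : 1 ≤ n) (p seg : List Char)
    (f : (List Char × Int) → Int → (List Char × Int))
    (hf : ∀ st y, f st y =
      if st.2 + 1 ≤ n + 1 then (st.1 ++ p ++ seg, st.2 + 1) else (st.1 ++ p, st.2 + 1)) :
    ((PySem.List.pyRange 0 (n + 1) 1).foldl f ([], 1)).1
      = (List.replicate n.toNat (p ++ seg)).flatten ++ p := by
  rw [PySem.List.pyRange_one_append 0 n (n + 1) (by omega) (by omega),
      PySem.List.pyRange_one_singleton, List.foldl_append]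
  have hlen : ((PySem.List.pyRange 0 n 1).length : Int) = n := by
    rw [PySem.List.length_pyRange_one]; omega
  rw [pv_loop (n + 1) p seg f hf (PySem.List.pyRange 0 n 1) [] 1 (by omega)]
  rw [List.foldl_cons, List.foldl_nil, hf, if_neg (by omega)]
  have : (PySem.List.pyRange 0 n 1).length = n.toNat := by omega
  simp [this]

theorem pv_row_eq (col cell : Int) (hcol : 1 ≤ col) (hcell : 1 ≤ cell) :
    print_row2 col cell
      = (List.replicate col.toNat (['+'] ++ List.replicate cell.toNat '-')).flatten ++ ['+'] := by
  unfold print_row2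
  rw [if_neg (by omega), if_neg (by omega)]
  refine pv_whole_loop col hcol ['+'] (List.replicate cell.toNat '-') _ ?_
  intro st y
  simp only [pv_fold_const, PySem.List.length_pyRange_one, pv_flat_singleton, Int.sub_zero]

theorem pv_vrow_eq (col cell : Int) (hcol : 1 ≤ col) (hcell : 1 ≤ cell) :
    print_vRow2 col cell
      = (List.replicate col.toNat (['|'] ++ List.replicate cell.toNat ' ')).flatten ++ ['|'] := by
  unfold print_vRow2
  rw [if_neg (by omega), if_neg (by omega)]
  refine pv_whole_loop col hcol ['|'] (List.replicate cell.toNat ' ') _ ?_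
  intro st y
  simp only [pv_fold_const, PySem.List.length_pyRange_one, pv_flat_singleton, Int.sub_zero]

-- ===== VERDICT (by name: the statement is the Claim_ definition above) =====
theorem print_grid2_spec : Claim_equal_print_grid2 := by
  intro gs cs _
  unfold Spec_print_grid2 print_grid2 print_grid2_alt
  simp only []
  set g : Int := if gs ≤ 1 then 2 else gs with hgdef
  set c : Int := if cs ≤ 1 then 1 else cs with hcdef
  have hgforms : (if gs > 1 then gs else 2) = g := by
    rw [hgdef]; split_ifs <;> omega
  have hcforms : (if cs > 1 then cs else 1) = c := by
    rw [hcdef]; split_ifs <;> omega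
  have hg : 1 ≤ g := by rw [hgdef]; split_ifs <;> omega
  have hc : 1 ≤ c := by rw [hcdef]; split_ifs <;> omega
  rw [hgforms, hcforms]
  have hA := pv_whole_loop g hg (print_row2 g c ++ ['\n'])
      ((List.replicate c.toNat (print_vRow2 g c ++ ['\n'])).flatten)
      (fun (st : List Char × Int) (_ : Int) =>
        let box := st.1 ++ (print_row2 g c ++ ['\n'])
        let cc := st.2 + 1
        if cc ≤ g + 1 then
          ((PySem.List.pyRange 0 c 1).foldl
            (fun (b : List Char) (_ : Int) => b ++ (print_vRow2 g c ++ ['\n'])) box, cc)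
        else (box, cc))
      (by
        intro st y
        simp only [pv_fold_const, PySem.List.length_pyRange_one, Int.sub_zero, List.append_assoc])
  rw [hA, pv_row_eq g c hg hc, pv_vrow_eq g c hg hc]
  simp [PySem.List.pyRepeat, List.append_assoc]
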